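-- pv_equiv track=rewrite | github.com/JonathanHeyno/company-clusterer | cc_backend/clusterer/utils.py | get_unique_field_names
-- ===== SOURCE A (Python) =====
-- def get_unique_field_names(dimensions):
--     field_names = set()
--     for dimension in dimensions:
--         dimension = ''.join(dimension.split())
--         chars_to_skip = '+-*/^()0123456789'
--         field_name = ''
--         for char in dimension:
--             if char in chars_to_skip:
--                 if field_name:
--                     field_names.add(field_name)
--                 field_name = ''
--             else:
--                 field_name += char
--         if field_name:
--             field_names.add(field_name)
--     return field_names
-- ===== SOURCE B (Python) =====
-- def get_unique_field_names(dimensions):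
--     delims = '+-*/^()0123456789'
--     table = str.maketrans(delims, ' ' * len(delims))
--     return {name
--             for dimension in dimensions
--             for name in ''.join(dimension.split()).translate(table).split()}
-- ===== Notes on version B (the rewrite author's own statement) =====
-- stated objective: idiomatic
-- what changed: Replaces the per-character accumulator state machine with a set comprehension that translates every delimiter character to a space and lets str.split extract the maximal field-name runs.
import Mathlib
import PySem

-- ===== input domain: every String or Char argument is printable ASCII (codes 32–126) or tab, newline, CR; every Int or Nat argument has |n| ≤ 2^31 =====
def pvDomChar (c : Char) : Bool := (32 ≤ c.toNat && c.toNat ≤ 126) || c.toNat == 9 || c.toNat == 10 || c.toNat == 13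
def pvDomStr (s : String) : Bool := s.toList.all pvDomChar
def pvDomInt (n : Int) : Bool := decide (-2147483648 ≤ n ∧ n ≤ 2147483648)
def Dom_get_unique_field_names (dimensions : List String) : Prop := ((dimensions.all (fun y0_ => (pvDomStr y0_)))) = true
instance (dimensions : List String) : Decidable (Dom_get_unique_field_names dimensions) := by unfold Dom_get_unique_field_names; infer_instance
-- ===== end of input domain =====

-- B replaces A's per-character accumulator state machine with translate-delimiters-to-space + split (idiomatic, same cost).


-- ===== PORT A =====
def pvCharsToSkip : List Char := "+-*/^()0123456789".toList

def get_unique_field_names (dimensions : List String) : List String :=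
  dimensions.foldl (fun field_names dimension =>
    -- dimension = ''.join(dimension.split())
    let d := PySem.Chars.join [] (PySem.Chars.split₀ dimension.toList)
    let st := d.foldl (fun (p : PySem.Set String × List Char) char =>
      if pvCharsToSkip.contains char then
        (if p.2 ≠ [] then PySem.Set.add p.1 (String.ofList p.2) else p.1, [])
      else (p.1, p.2 ++ [char])) (field_names, [])
    if st.2 ≠ [] then PySem.Set.add st.1 (String.ofList st.2) else st.1) PySem.Set.empty

-- ===== PORT B =====
def pvDelims : List Char := "+-*/^()0123456789".toList

def get_unique_field_names_alt (dimensions : List String) : List String :=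
  dimensions.foldl (fun names dimension =>
    let stripped := PySem.Chars.join [] (PySem.Chars.split₀ dimension.toList)
    -- str.translate with a table sending each delimiter to ' ' = pointwise char map (exact here: 1-char-to-1-char table)
    let translated := stripped.map (fun c => if pvDelims.contains c then ' ' else c)
    PySem.Set.update names ((PySem.Chars.split₀ translated).map String.ofList)) PySem.Set.empty

-- ===== PRECONDITION & SPEC =====
def Spec_get_unique_field_names (dimensions : List String) (out : List String) : Prop := out = get_unique_field_names_alt dimensions
instance (dimensions : List String) (out : List String) : Decidable (Spec_get_unique_field_names dimensions out) := by unfold Spec_get_unique_field_names; infer_instance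

-- ===== CLAIM (what is proved, stated in full; the proofs are below) =====
def Claim_equal_get_unique_field_names : Prop := ∀ (dimensions : List String), Dom_get_unique_field_names dimensions → Spec_get_unique_field_names dimensions (get_unique_field_names dimensions)

-- ===== LEMMAS AND PROOFS =====

-- the character translation used by B
def pvTr (c : Char) : Char := if pvDelims.contains c then ' ' else c

-- split₀.go's token accumulator is a reversed prefix of the result
theorem pv_go_acc (l : List Char) (cur : List Char) (acc : List (List Char)) :
    PySem.Chars.split₀.go l cur acc = acc.reverse ++ PySem.Chars.split₀.go l cur [] := by
  induction l generalizing cur acc with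
  | nil =>
    simp only [PySem.Chars.split₀.go]
    split_ifs <;> simp
  | cons c rest ih =>
    simp only [PySem.Chars.split₀.go]
    split_ifs with h1 h2
    · exact ih _ _
    · rw [ih [] (cur.reverse :: acc), ih [] [cur.reverse]]; simp
    · exact ih _ _

-- every character of every token produced by split₀.go is non-whitespace (given the seeds are)
theorem pv_go_nospace (l : List Char) (cur : List Char) (acc : List (List Char))
    (hcur : ∀ c ∈ cur, PySem.Chars.isspace c = false)
    (hacc : ∀ t ∈ acc, ∀ c ∈ t, PySem.Chars.isspace c = false) :
    ∀ t ∈ PySem.Chars.split₀.go l cur acc, ∀ c ∈ t, PySem.Chars.isspace c = false := by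
  induction l generalizing cur acc with
  | nil =>
    simp only [PySem.Chars.split₀.go]
    split_ifs with h
    · intro t ht; exact hacc t (by simpa using ht)
    · intro t ht c hc
      rcases (by simpa using ht : t ∈ acc ∨ t = cur.reverse) with ht' | rfl
      · exact hacc t ht' c hc
      · exact hcur c (by simpa using hc)
  | cons x rest ih =>
    simp only [PySem.Chars.split₀.go]
    split_ifs with h1 h2
    · exact ih [] acc (by simp) hacc
    · refine ih [] (cur.reverse :: acc) (by simp) ?_
      intro t ht c hc
      rcases List.mem_cons.mp ht with rfl | ht'
      · exact hcur c (by simpa using hc)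
      · exact hacc t ht' c hc
    · refine ih (x :: cur) acc ?_ hacc
      intro c hc
      rcases List.mem_cons.mp hc with rfl | hc'
      · simpa using h1
      · exact hcur c hc'

theorem pv_mem_join_nil (parts : List (List Char)) (c : Char)
    (h : c ∈ PySem.Chars.join [] parts) : ∃ t ∈ parts, c ∈ t := by
  induction parts with
  | nil => simp [PySem.Chars.join, List.intercalate] at h
  | cons a rest ih =>
    cases rest with
    | nil => exact ⟨a, by simp, by simpa [PySem.Chars.join, List.intercalate] using h⟩
    | cons b rest' =>
      rw [show PySem.Chars.join [] (a :: b :: rest') = a ++ PySem.Chars.join [] (b :: rest') from by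
        simp [PySem.Chars.join, List.intercalate, List.intersperse]] at h
      rcases List.mem_append.mp h with h' | h'
      · exact ⟨a, by simp, h'⟩
      · rcases ih h' with ⟨t, ht, hc⟩
        exact ⟨t, by simp [ht], hc⟩

theorem pv_stripped_nospace (s : List Char) :
    ∀ c ∈ PySem.Chars.join [] (PySem.Chars.split₀ s), PySem.Chars.isspace c = false := by
  intro c hc
  rcases pv_mem_join_nil _ c hc with ⟨t, ht, hct⟩
  exact pv_go_nospace s [] [] (by simp) (by simp) t ht c hct

theorem pv_space_isspace : PySem.Chars.isspace ' ' = true := by decide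

-- the delimiter scan of A equals split₀ over the translated string, folded into the set
theorem pv_main (cs : List Char) (cur : List Char) (S : PySem.Set String)
    (hcs : ∀ c ∈ cs, PySem.Chars.isspace c = false) :
    (let st := cs.foldl (fun (p : PySem.Set String × List Char) char =>
        if pvCharsToSkip.contains char then
          (if p.2 ≠ [] then PySem.Set.add p.1 (String.ofList p.2) else p.1, [])
        else (p.1, p.2 ++ [char])) (S, cur)
      if st.2 ≠ [] then PySem.Set.add st.1 (String.ofList st.2) else st.1)
    = PySem.Set.update S ((PySem.Chars.split₀.go (cs.map pvTr) cur.reverse []).map String.ofList) := by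
  induction cs generalizing cur S with
  | nil =>
    simp only [List.foldl_nil, List.map_nil, PySem.Chars.split₀.go]
    by_cases h : cur = []
    · subst h; simp [PySem.Set.update]
    · simp [h, PySem.Set.update]
  | cons c rest ih =>
    have hrest : ∀ x ∈ rest, PySem.Chars.isspace x = false := fun x hx => hcs x (List.mem_cons_of_mem _ hx)
    cases hd : pvCharsToSkip.contains c with
    | true =>
      have hd' : pvDelims.contains c = true := hd
      have htr : pvTr c = ' ' := by simp only [pvTr, hd', if_true]
      simp only [List.foldl_cons, List.map_cons, htr, hd, if_true, PySem.Chars.split₀.go,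
        pv_space_isspace]
      by_cases h : cur = []
      · subst h
        simpa using ih [] S hrest
      · rw [if_pos h, if_neg (by simp [h] : ¬ cur.reverse.isEmpty = true),
          pv_go_acc (rest.map pvTr) [] [cur.reverse.reverse]]
        simp only [List.reverse_reverse, List.reverse_cons, List.reverse_nil, List.nil_append,
          List.singleton_append, List.map_cons]
        rw [show PySem.Set.update S (String.ofList cur :: (PySem.Chars.split₀.go (rest.map pvTr) [] []).map String.ofList)
            = PySem.Set.update (PySem.Set.add S (String.ofList cur)) ((PySem.Chars.split₀.go (rest.map pvTr) [] []).map String.ofList) from rfl]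
        simpa using ih [] (PySem.Set.add S (String.ofList cur)) hrest
    | false =>
      have hd' : pvDelims.contains c = false := hd
      have htr : pvTr c = c := by simp only [pvTr, hd', Bool.false_eq_true, if_false]
      have hns : PySem.Chars.isspace c = false := hcs c List.mem_cons_self
      simp only [List.foldl_cons, List.map_cons, htr, hd, Bool.false_eq_true, if_false,
        PySem.Chars.split₀.go, hns]
      have e : c :: cur.reverse = (cur ++ [c]).reverse := by simp
      rw [e]
      simpa using ih (cur ++ [c]) S hrest

-- one dimension step of A equals one dimension step of B
theorem pv_step (S : PySem.Set String) (dimension : String) :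
    (let d := PySem.Chars.join [] (PySem.Chars.split₀ dimension.toList)
     let st := d.foldl (fun (p : PySem.Set String × List Char) char =>
        if pvCharsToSkip.contains char then
          (if p.2 ≠ [] then PySem.Set.add p.1 (String.ofList p.2) else p.1, [])
        else (p.1, p.2 ++ [char])) (S, [])
     if st.2 ≠ [] then PySem.Set.add st.1 (String.ofList st.2) else st.1)
    = (let stripped := PySem.Chars.join [] (PySem.Chars.split₀ dimension.toList)
       let translated := stripped.map (fun c => if pvDelims.contains c then ' ' else c)
       PySem.Set.update S ((PySem.Chars.split₀ translated).map String.ofList)) := by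
  have hfun : pvTr = (fun c => if pvDelims.contains c then ' ' else c) := by
    funext c; rfl
  have h := pv_main (PySem.Chars.join [] (PySem.Chars.split₀ dimension.toList)) [] S
    (pv_stripped_nospace dimension.toList)
  rw [hfun] at h
  simpa [PySem.Chars.split₀] using h

theorem pv_foldl (l : List String) (S : PySem.Set String) :
    l.foldl (fun field_names dimension =>
      let d := PySem.Chars.join [] (PySem.Chars.split₀ dimension.toList)
      let st := d.foldl (fun (p : PySem.Set String × List Char) char =>
        if pvCharsToSkip.contains char then
          (if p.2 ≠ [] then PySem.Set.add p.1 (String.ofList p.2) else p.1, [])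
        else (p.1, p.2 ++ [char])) (field_names, [])
      if st.2 ≠ [] then PySem.Set.add st.1 (String.ofList st.2) else st.1) S
    = l.foldl (fun names dimension =>
      let stripped := PySem.Chars.join [] (PySem.Chars.split₀ dimension.toList)
      let translated := stripped.map (fun c => if pvDelims.contains c then ' ' else c)
      PySem.Set.update names ((PySem.Chars.split₀ translated).map String.ofList)) S := by
  induction l generalizing S with
  | nil => rfl
  | cons d rest ih =>
    simp only [List.foldl_cons]
    rw [show (let d' := PySem.Chars.join [] (PySem.Chars.split₀ d.toList)
      let st := d'.foldl (fun (p : PySem.Set String × List Char) char =>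
        if pvCharsToSkip.contains char then
          (if p.2 ≠ [] then PySem.Set.add p.1 (String.ofList p.2) else p.1, [])
        else (p.1, p.2 ++ [char])) (S, [])
      if st.2 ≠ [] then PySem.Set.add st.1 (String.ofList st.2) else st.1)
      = (let stripped := PySem.Chars.join [] (PySem.Chars.split₀ d.toList)
         let translated := stripped.map (fun c => if pvDelims.contains c then ' ' else c)
         PySem.Set.update S ((PySem.Chars.split₀ translated).map String.ofList)) from pv_step S d]
    exact ih _

-- ===== VERDICT (by name: the statement is the Claim_ definition above) =====
theorem get_unique_field_names_spec : Claim_equal_get_unique_field_names := by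
  intro dimensions _
  unfold Spec_get_unique_field_names get_unique_field_names get_unique_field_names_alt
  exact pv_foldl dimensions PySem.Set.empty
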